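-- pv_equiv track=rewrite | github.com/wan-catherine/Leetcode | problems/N1955_Count_Number_Of_Special_Subsequences.py | countSpecialSubsequences
-- ===== SOURCE A (Python) =====
-- from typing import List
--
-- def countSpecialSubsequences(nums: List[int]) -> int:
--     length = len(nums)
--     zero, one, two = 1, 0, 0
--     for i in range(length):
--         if nums[i] == 0:
--             zero = 2 * zero
--         elif nums[i] == 1:
--             one = zero - 1 + 2 * one
--         else:
--             two = one + 2 * two
--     return two % (10**9+7)
-- ===== SOURCE B (Python) =====
-- def countSpecialSubsequences(nums):
--     # Divide & conquer: each element gets a 4x4 transfer matrix of the automaton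
--     # start -> in-zeros -> in-ones -> in-twos (row-major 16-tuple); the matrix
--     # product over a segment summarises it, and the answer is the top-right entry
--     # of the product over the whole array.
--     def mat(v):
--         if v == 0:
--             return (1, 1, 0, 0, 0, 2, 0, 0, 0, 0, 1, 0, 0, 0, 0, 1)
--         if v == 1:
--             return (1, 0, 0, 0, 0, 1, 1, 0, 0, 0, 2, 0, 0, 0, 0, 1)
--         return (1, 0, 0, 0, 0, 1, 0, 0, 0, 0, 1, 1, 0, 0, 0, 2)
--
--     def mul(a, b):
--         (a00, a01, a02, a03, a10, a11, a12, a13,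
--          a20, a21, a22, a23, a30, a31, a32, a33) = a
--         (b00, b01, b02, b03, b10, b11, b12, b13,
--          b20, b21, b22, b23, b30, b31, b32, b33) = b
--         return (a00*b00 + a01*b10 + a02*b20 + a03*b30,
--                 a00*b01 + a01*b11 + a02*b21 + a03*b31,
--                 a00*b02 + a01*b12 + a02*b22 + a03*b32,
--                 a00*b03 + a01*b13 + a02*b23 + a03*b33,
--                 a10*b00 + a11*b10 + a12*b20 + a13*b30,
--                 a10*b01 + a11*b11 + a12*b21 + a13*b31,
--                 a10*b02 + a11*b12 + a12*b22 + a13*b32,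
--                 a10*b03 + a11*b13 + a12*b23 + a13*b33,
--                 a20*b00 + a21*b10 + a22*b20 + a23*b30,
--                 a20*b01 + a21*b11 + a22*b21 + a23*b31,
--                 a20*b02 + a21*b12 + a22*b22 + a23*b32,
--                 a20*b03 + a21*b13 + a22*b23 + a23*b33,
--                 a30*b00 + a31*b10 + a32*b20 + a33*b30,
--                 a30*b01 + a31*b11 + a32*b21 + a33*b31,
--                 a30*b02 + a31*b12 + a32*b22 + a33*b32,
--                 a30*b03 + a31*b13 + a32*b23 + a33*b33)
--
--     def prod(lo, hi):
--         if hi - lo == 1: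
--             return mat(nums[lo])
--         mid = (lo + hi) // 2
--         return mul(prod(lo, mid), prod(mid, hi))
--
--     if not nums:
--         return 0
--     return prod(0, len(nums))[3] % (10 ** 9 + 7)
-- ===== Notes on version B (the rewrite author's own statement) =====
-- stated objective: alternative
-- what changed: Replaces the left-to-right three-counter DP by a divide-and-conquer product of four-by-four transfer matrices of the zeros-then-ones-then-twos automaton, reading the answer from the top-right entry of the whole product.
import Mathlib
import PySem

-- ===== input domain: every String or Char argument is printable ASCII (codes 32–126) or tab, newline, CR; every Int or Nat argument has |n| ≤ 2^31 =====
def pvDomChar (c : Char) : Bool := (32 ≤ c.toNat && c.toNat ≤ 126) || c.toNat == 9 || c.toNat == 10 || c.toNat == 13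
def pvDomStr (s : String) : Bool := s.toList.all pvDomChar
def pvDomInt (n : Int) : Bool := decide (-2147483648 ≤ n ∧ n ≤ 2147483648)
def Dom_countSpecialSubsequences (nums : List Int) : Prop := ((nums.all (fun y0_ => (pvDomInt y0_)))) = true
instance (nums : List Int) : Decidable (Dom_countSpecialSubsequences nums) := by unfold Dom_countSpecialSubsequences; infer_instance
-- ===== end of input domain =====

-- B replaces the three-counter DP by a divide-and-conquer product of four-by-four
-- transfer matrices of the zeros-then-ones-then-twos automaton; same return value, proved below.

-- ===== PORT A =====
-- A's loop body: state (zero, one, two), branch order as in the Python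
def stepA_countSpecialSubsequences (s : Int × Int × Int) (x : Int) : Int × Int × Int :=
  if x = 0 then (2 * s.1, s.2.1, s.2.2)
  else if x = 1 then (s.1, s.1 - 1 + 2 * s.2.1, s.2.2)
  else (s.1, s.2.1, s.2.1 + 2 * s.2.2)

def countSpecialSubsequences (nums : List Int) : Int :=
  let length : Int := nums.length
  let s := (PySem.List.pyRange 0 length 1).foldl
    (fun s i => stepA_countSpecialSubsequences s (PySem.List.pyGetD nums i 0)) (1, 0, 0)
  s.2.2 % (10 ^ 9 + 7)

-- ===== PORT B =====
-- four-by-four integer matrix, row-major entries (port of B's matrix tuples)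
structure Mat4 where
  a00 : Int
  a01 : Int
  a02 : Int
  a03 : Int
  a10 : Int
  a11 : Int
  a12 : Int
  a13 : Int
  a20 : Int
  a21 : Int
  a22 : Int
  a23 : Int
  a30 : Int
  a31 : Int
  a32 : Int
  a33 : Int
deriving DecidableEq, Repr

-- B's mat(v): the element's transfer matrix, row-major as in Source B
def matB (v : Int) : Mat4 :=
  if v = 0 then ⟨1,1,0,0, 0,2,0,0, 0,0,1,0, 0,0,0,1⟩
  else if v = 1 then ⟨1,0,0,0, 0,1,1,0, 0,0,2,0, 0,0,0,1⟩
  else ⟨1,0,0,0, 0,1,0,0, 0,0,1,1, 0,0,0,2⟩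

-- B's mul(a,b): the matrix product, entry by entry as in Source B
def mulB (a b : Mat4) : Mat4 :=
  ⟨a.a00*b.a00 + a.a01*b.a10 + a.a02*b.a20 + a.a03*b.a30,
   a.a00*b.a01 + a.a01*b.a11 + a.a02*b.a21 + a.a03*b.a31,
   a.a00*b.a02 + a.a01*b.a12 + a.a02*b.a22 + a.a03*b.a32,
   a.a00*b.a03 + a.a01*b.a13 + a.a02*b.a23 + a.a03*b.a33,
   a.a10*b.a00 + a.a11*b.a10 + a.a12*b.a20 + a.a13*b.a30,
   a.a10*b.a01 + a.a11*b.a11 + a.a12*b.a21 + a.a13*b.a31,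
   a.a10*b.a02 + a.a11*b.a12 + a.a12*b.a22 + a.a13*b.a32,
   a.a10*b.a03 + a.a11*b.a13 + a.a12*b.a23 + a.a13*b.a33,
   a.a20*b.a00 + a.a21*b.a10 + a.a22*b.a20 + a.a23*b.a30,
   a.a20*b.a01 + a.a21*b.a11 + a.a22*b.a21 + a.a23*b.a31,
   a.a20*b.a02 + a.a21*b.a12 + a.a22*b.a22 + a.a23*b.a32,
   a.a20*b.a03 + a.a21*b.a13 + a.a22*b.a23 + a.a23*b.a33,
   a.a30*b.a00 + a.a31*b.a10 + a.a32*b.a20 + a.a33*b.a30,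
   a.a30*b.a01 + a.a31*b.a11 + a.a32*b.a21 + a.a33*b.a31,
   a.a30*b.a02 + a.a31*b.a12 + a.a32*b.a22 + a.a33*b.a32,
   a.a30*b.a03 + a.a31*b.a13 + a.a32*b.a23 + a.a33*b.a33⟩

-- B's prod(lo,hi): product of the element matrices of nums[lo:hi] by halving;
-- structural recursion on a fuel bound f ≥ hi - lo (the recursion halves the segment)
def prodB : Nat → List Int → Nat → Nat → Mat4
  | 0, nums, lo, _ => matB (nums.getD lo 0)
  | f + 1, nums, lo, hi =>
    if hi ≤ lo + 1 then matB (nums.getD lo 0)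
    else mulB (prodB f nums lo ((lo + hi) / 2)) (prodB f nums ((lo + hi) / 2) hi)

def countSpecialSubsequences_alt (nums : List Int) : Int :=
  if nums = [] then 0
  else (prodB nums.length nums 0 nums.length).a03 % (10 ^ 9 + 7)

-- ===== PRECONDITION & SPEC =====
def Spec_countSpecialSubsequences (nums : List Int) (out : Int) : Prop := out = countSpecialSubsequences_alt nums
instance (nums : List Int) (out : Int) : Decidable (Spec_countSpecialSubsequences nums out) := by unfold Spec_countSpecialSubsequences; infer_instance

-- ===== CLAIM (what is proved, stated in full; the proofs are below) =====
def Claim_equal_countSpecialSubsequences : Prop := ∀ (nums : List Int), Dom_countSpecialSubsequences nums → Spec_countSpecialSubsequences nums (countSpecialSubsequences nums)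

-- ===== LEMMAS AND PROOFS =====

def idM : Mat4 := ⟨1,0,0,0, 0,1,0,0, 0,0,1,0, 0,0,0,1⟩

def listProd (l : List Int) : Mat4 := l.foldr (fun x m => mulB (matB x) m) idM

lemma mulB_assoc (a b c : Mat4) : mulB (mulB a b) c = mulB a (mulB b c) := by
  cases a; cases b; cases c
  simp only [mulB, Mat4.mk.injEq]
  refine ⟨?_,?_,?_,?_,?_,?_,?_,?_,?_,?_,?_,?_,?_,?_,?_,?_⟩ <;> ring

lemma idM_mul (m : Mat4) : mulB idM m = m := by
  cases m; simp [mulB, idM]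

lemma mul_idM (m : Mat4) : mulB m idM = m := by
  cases m; simp [mulB, idM]

lemma listProd_nil : listProd [] = idM := rfl

lemma listProd_cons (x : Int) (l : List Int) :
    listProd (x :: l) = mulB (matB x) (listProd l) := rfl

lemma listProd_append (a b : List Int) :
    listProd (a ++ b) = mulB (listProd a) (listProd b) := by
  induction a with
  | nil => simp [listProd_nil, idM_mul]
  | cons x xs ih =>
    simp only [List.cons_append, listProd_cons, ih, mulB_assoc]

lemma listProd_singleton (x : Int) : listProd [x] = matB x := by
  simp [listProd_cons, listProd_nil, mul_idM]

-- prodB computes the product of the matrices of the segment nums[lo:hi]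
lemma prodB_eq : ∀ (f : ℕ) (nums : List Int) (lo hi : ℕ), hi - lo ≤ f → lo < hi →
    hi ≤ nums.length →
    prodB f nums lo hi = listProd ((nums.drop lo).take (hi - lo)) := by
  intro f
  induction f with
  | zero => intro nums lo hi hf hlt hle; omega
  | succ f ih =>
    intro nums lo hi hf hlt hle
    rw [prodB]
    by_cases hbase : hi ≤ lo + 1
    · have hhi : hi = lo + 1 := by omega
      simp only [hbase, if_true]
      subst hhi
      have hlo : lo < nums.length := by omega
      obtain ⟨y, ys, hd⟩ : ∃ y ys, nums.drop lo = y :: ys := by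
        cases h : nums.drop lo with
        | nil =>
          exfalso
          have := congrArg List.length h
          simp at this
          omega
        | cons y ys => exact ⟨y, ys, rfl⟩
      have hy : nums[lo]?.getD 0 = y := by
        have h0 : (nums.drop lo)[0]? = some y := by rw [hd]; rfl
        rw [List.getElem?_drop] at h0
        norm_num at h0
        simp [h0]
      have h1 : lo + 1 - lo = 1 := by omega
      rw [h1, hd]
      simp [listProd_singleton, List.getD_eq_getElem?_getD, hy]
    · simp only [hbase, if_false]
      have h2 : lo + 2 ≤ hi := by omega
      set mid := (lo + hi) / 2 with hmid
      have hm1 : lo < mid := by omega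
      have hm2 : mid < hi := by omega
      rw [ih nums lo mid (by omega) hm1 (by omega),
          ih nums mid hi (by omega) hm2 hle]
      rw [← listProd_append]
      have hdd : (nums.drop lo).drop (mid - lo) = nums.drop mid := by
        rw [List.drop_drop]
        congr 1
        omega
      have hsplit : (nums.drop lo).take (hi - lo)
          = (nums.drop lo).take (mid - lo) ++ ((nums.drop mid).take (hi - mid)) := by
        rw [← hdd, ← List.take_add]
        congr 1
        omega
      rw [hsplit]

-- the product of element matrices is upper triangular below the subdiagonal
lemma lowTri (l : List Int) :
    (listProd l).a21 = 0 ∧ (listProd l).a31 = 0 ∧ (listProd l).a32 = 0 := by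
  induction l with
  | nil => exact ⟨rfl, rfl, rfl⟩
  | cons x xs ih =>
    obtain ⟨h21, h31, h32⟩ := ih
    rw [listProd_cons]
    by_cases h0 : x = 0
    · subst h0; simp [matB, mulB, h21, h31, h32]
    · by_cases h1 : x = 1
      · subst h1; simp [matB, mulB, h21, h31, h32]
      · simp [matB, mulB, h0, h1, h21, h31, h32]

-- A's fold from an arbitrary state, expressed through the segment matrix entries
lemma key_invariant : ∀ (l : List Int) (ze on tw : Int),
    List.foldl stepA_countSpecialSubsequences (ze, on, tw) l =
      (1 + (listProd l).a01 + (ze - 1) * (listProd l).a11,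
       (listProd l).a02 + (ze - 1) * (listProd l).a12 + on * (listProd l).a22,
       (listProd l).a03 + (ze - 1) * (listProd l).a13 + on * (listProd l).a23
         + tw * (listProd l).a33) := by
  intro l
  induction l with
  | nil => intro ze on tw; simp [listProd_nil, idM]
  | cons x xs ih =>
    intro ze on tw
    obtain ⟨h21, h31, h32⟩ := lowTri xs
    rw [List.foldl_cons, listProd_cons]
    by_cases h0 : x = 0
    · subst h0
      have hs : stepA_countSpecialSubsequences (ze, on, tw) 0 = (2 * ze, on, tw) := by
        simp [stepA_countSpecialSubsequences]
      rw [hs, ih]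
      simp only [matB, if_true, mulB, h21, h31, h32, Prod.mk.injEq]
      refine ⟨?_, ?_, ?_⟩ <;> ring
    · by_cases h1 : x = 1
      · subst h1
        have hs : stepA_countSpecialSubsequences (ze, on, tw) 1
            = (ze, ze - 1 + 2 * on, tw) := by
          simp [stepA_countSpecialSubsequences]
        rw [hs, ih]
        simp only [matB, one_ne_zero, if_false, if_true, mulB, h21, h31, h32,
          Prod.mk.injEq]
        refine ⟨?_, ?_, ?_⟩ <;> ring
      · have hs : stepA_countSpecialSubsequences (ze, on, tw) x
            = (ze, on, on + 2 * tw) := by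
          simp [stepA_countSpecialSubsequences, h0, h1]
        rw [hs, ih]
        simp only [matB, h0, h1, if_false, mulB, h21, h31, h32, Prod.mk.injEq]
        refine ⟨?_, ?_, ?_⟩ <;> ring

lemma portA_eq (nums : List Int) :
    countSpecialSubsequences nums = (listProd nums).a03 % (10 ^ 9 + 7) := by
  show (List.foldl (fun s i => stepA_countSpecialSubsequences s (PySem.List.pyGetD nums i 0))
      (1, 0, 0) (PySem.List.pyRange 0 (nums.length : Int) 1)).2.2 % (10 ^ 9 + 7)
    = (listProd nums).a03 % (10 ^ 9 + 7)
  rw [PySem.List.foldl_pyRange_zero_pyGetD' nums 0 stepA_countSpecialSubsequences (1, 0, 0)]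
  rw [key_invariant]
  ring_nf

-- ===== VERDICT (by name: the statement is the Claim_ definition above) =====
theorem countSpecialSubsequences_spec : Claim_equal_countSpecialSubsequences := by
  intro nums _
  unfold Spec_countSpecialSubsequences countSpecialSubsequences_alt
  by_cases hnil : nums = []
  · subst hnil
    simp only [if_true]
    rw [portA_eq]
    simp [listProd_nil, idM]
  · simp only [hnil, if_false]
    rw [portA_eq]
    have hlen : 0 < nums.length := List.length_pos_iff.mpr hnil
    rw [prodB_eq nums.length nums 0 nums.length (by omega) hlen (le_refl _)]
    simp
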